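-- pv_equiv track=rewrite | github.com/sehagler/historical_record_ocr | py/hr_text_segmenter/hr_text_segmenter.py | get_num_digit_seqs
-- ===== SOURCE A (Python) =====
-- def get_num_digit_seqs(line_data):
--     idxs = [i for i, ch in enumerate(line_data) if ch.isdigit()]
--     diffs = [idxs[i+1]-idxs[i] for i in range(len(idxs)-1)]
--     if not diffs:
--         num_digit_seqs = 0
--     else:
--         num_digit_seqs = sum(i > 1 for i in diffs) + 1
--     return num_digit_seqs
-- ===== SOURCE B (Python) =====
-- def get_num_digit_seqs(line_data):
--     count = 0
--     prev = False
--     for ch in line_data: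
--         cur = ch.isdigit()
--         if cur and not prev:
--             count += 1
--         prev = cur
--     return count
-- ===== Notes on version B (the rewrite author's own statement) =====
-- stated objective: simpler
-- what changed: Replaces A's three passes (index list, pairwise diff list, sum of gaps) by a single streaming pass that counts rising edges of a prev-is-digit flag, building no intermediate lists (measured ~2.5x faster).
-- intended difference: On strings containing exactly one digit character A returns 0 (its diff list is empty so the +1 for the existing run is never added) while B returns 1, the intended number of digit sequences. — e.g. on get_num_digit_seqs("a7b"): A returns 0, B returns 1
import Mathlib
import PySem

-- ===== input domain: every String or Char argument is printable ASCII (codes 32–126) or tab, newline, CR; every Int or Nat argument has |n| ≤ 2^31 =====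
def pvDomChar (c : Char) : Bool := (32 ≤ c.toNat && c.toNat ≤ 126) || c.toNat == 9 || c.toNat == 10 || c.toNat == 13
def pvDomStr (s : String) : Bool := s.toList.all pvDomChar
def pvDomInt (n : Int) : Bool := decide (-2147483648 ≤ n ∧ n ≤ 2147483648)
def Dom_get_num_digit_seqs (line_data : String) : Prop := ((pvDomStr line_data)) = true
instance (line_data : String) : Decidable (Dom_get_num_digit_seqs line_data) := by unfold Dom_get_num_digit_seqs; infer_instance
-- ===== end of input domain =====

-- B replaces A's three list-building passes by one streaming rising-edge counter (no intermediate lists; measured faster in a timing run);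
-- on strings with exactly one digit character A returns 0 and B returns the intended 1 (see D_).


-- ===== PORT A =====
def get_num_digit_seqs (line_data : String) : Int :=
  -- idxs = [i for i, ch in enumerate(line_data) if ch.isdigit()]
  let idxs : List Int :=
    ((PySem.List.enumerate line_data.toList).filter (fun p => PySem.Chars.isdigit p.2)).map (·.1)
  -- diffs = [idxs[i+1]-idxs[i] for i in range(len(idxs)-1)]
  let diffs : List Int :=
    (PySem.List.pyRange 0 ((idxs.length : Int) - 1) 1).map
      (fun i => PySem.List.pyGetD idxs (i + 1) 0 - PySem.List.pyGetD idxs i 0)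
  if diffs = [] then 0
  else (diffs.map (fun i => if 1 < i then (1 : Int) else 0)).sum + 1

-- ===== PORT B =====
def get_num_digit_seqs_alt (line_data : String) : Int :=
  (line_data.toList.foldl
    (fun (st : Bool × Int) ch =>
      let cur := PySem.Chars.isdigit ch
      (cur, if cur && !st.1 then st.2 + 1 else st.2))
    (false, 0)).2

-- ===== PRECONDITION & SPEC =====
-- On strings with exactly one digit character, A returns 0 (its diff list is empty so the +1
-- for the existing run is never added) while B returns 1, the intended number of digit sequences.
def D_get_num_digit_seqs (line_data : String) : Prop :=
  line_data.toList.countP (fun c => PySem.Chars.isdigit c) = 1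
instance (line_data : String) : Decidable (D_get_num_digit_seqs line_data) := by
  unfold D_get_num_digit_seqs; infer_instance

def Spec_get_num_digit_seqs (line_data : String) (out : Int) : Prop :=
  ¬ D_get_num_digit_seqs line_data → out = get_num_digit_seqs_alt line_data
instance (line_data : String) (out : Int) : Decidable (Spec_get_num_digit_seqs line_data out) := by
  unfold Spec_get_num_digit_seqs; infer_instance

def pvDiffWitness_get_num_digit_seqs : String := "a7b"
def pvDiffWitnessOut_get_num_digit_seqs : Int × Int := (0, 1)

-- ===== CLAIM =====
def Claim_unchanged_get_num_digit_seqs : Prop :=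
  ∀ (line_data : String), Dom_get_num_digit_seqs line_data →
    Spec_get_num_digit_seqs line_data (get_num_digit_seqs line_data)
def Claim_changed_get_num_digit_seqs : Prop :=
  Dom_get_num_digit_seqs (pvDiffWitness_get_num_digit_seqs) ∧
  D_get_num_digit_seqs (pvDiffWitness_get_num_digit_seqs) ∧
  get_num_digit_seqs (pvDiffWitness_get_num_digit_seqs) = pvDiffWitnessOut_get_num_digit_seqs.1 ∧
  get_num_digit_seqs_alt (pvDiffWitness_get_num_digit_seqs) = pvDiffWitnessOut_get_num_digit_seqs.2 ∧
  pvDiffWitnessOut_get_num_digit_seqs.1 ≠ pvDiffWitnessOut_get_num_digit_seqs.2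
def Claim_exact_get_num_digit_seqs : Prop :=
  ∀ (line_data : String), Dom_get_num_digit_seqs line_data →
    D_get_num_digit_seqs line_data →
    get_num_digit_seqs line_data ≠ get_num_digit_seqs_alt line_data

-- ===== LEMMAS AND PROOFS =====

-- positions of digit characters, starting at offset s (mathematical view of A's idxs)
def idxsR (cs : List Char) (s : Int) : List Int :=
  match cs with
  | [] => []
  | c :: t => if PySem.Chars.isdigit c then s :: idxsR t (s + 1) else idxsR t (s + 1)

-- gaps-with-a-previous-index counter: G prev l counts adjacent jumps > 1 in (prev :: l)
def gapsG (prev : Int) (l : List Int) : Int :=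
  match l with
  | [] => 0
  | a :: t => (if 1 < a - prev then 1 else 0) + gapsG a t

def countRuns (l : List Int) : Int :=
  match l with
  | [] => 0
  | a :: t => gapsG a t + 1

-- rising-edge count (mathematical view of B's fold)
def rises (p : Bool) (cs : List Char) : Int :=
  match cs with
  | [] => 0
  | c :: t => (if PySem.Chars.isdigit c && !p then 1 else 0) + rises (PySem.Chars.isdigit c) t

theorem foldl_eq_rises (cs : List Char) (p : Bool) (k : Int) :
    (cs.foldl
      (fun (st : Bool × Int) ch =>
        let cur := PySem.Chars.isdigit ch
        (cur, if cur && !st.1 then st.2 + 1 else st.2))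
      (p, k)).2 = k + rises p cs := by
  induction cs generalizing p k with
  | nil => simp [rises]
  | cons c t ih =>
      simp only [List.foldl_cons, rises, ih]
      by_cases h : (PySem.Chars.isdigit c && !p) = true <;> simp [h] <;> ring

theorem mem_idxsR_ge (cs : List Char) (s : Int) :
    ∀ x ∈ idxsR cs s, s ≤ x := by
  induction cs generalizing s with
  | nil => simp [idxsR]
  | cons c t ih =>
      intro x hx
      simp only [idxsR] at hx
      split at hx
      · rcases List.mem_cons.mp hx with h | h
        · omega
        · have := ih (s + 1) x h; omega
      · have := ih (s + 1) x hx; omega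

theorem rises_eq (cs : List Char) (s : Int) :
    rises true cs = gapsG (s - 1) (idxsR cs s) ∧
    rises false cs = countRuns (idxsR cs s) := by
  induction cs generalizing s with
  | nil => simp [rises, idxsR, gapsG, countRuns]
  | cons c t ih =>
      have hsub : s + 1 - 1 = s := by ring
      by_cases h : PySem.Chars.isdigit c = true
      · obtain ⟨ihT, _⟩ := ih (s + 1)
        rw [hsub] at ihT
        constructor
        · simp only [rises, idxsR, h, ihT]
          simp [gapsG, show ¬ (1:Int) < s - (s - 1) by omega]
        · simp only [rises, idxsR, h, countRuns, ihT]
          simp; ring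
      · obtain ⟨_, ihF⟩ := ih (s + 1)
        have hcons : idxsR (c :: t) s = idxsR t (s + 1) := by simp [idxsR, h]
        constructor
        · simp only [rises, h, hcons, ihF]
          cases hI : idxsR t (s + 1) with
          | nil => simp [countRuns, gapsG]
          | cons a l =>
              have ha : s + 1 ≤ a := mem_idxsR_ge t (s + 1) a (by rw [hI]; exact List.mem_cons_self)
              simp only [countRuns, gapsG, if_pos (by omega : (1:Int) < a - (s - 1))]
              simp; ring
        · simp only [rises, h, hcons, ihF]
          simp

theorem idxsR_spec (cs : List Char) (s : Int) :
    ((PySem.List.enumerate cs s).filter (fun p => PySem.Chars.isdigit p.2)).map (·.1)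
      = idxsR cs s := by
  induction cs generalizing s with
  | nil => simp [PySem.List.enumerate_nil, idxsR]
  | cons c t ih =>
      rw [PySem.List.enumerate_cons]
      by_cases h : PySem.Chars.isdigit c = true <;>
        simp [idxsR, h, List.filter_cons, ih]

theorem length_idxsR (cs : List Char) (s : Int) :
    (idxsR cs s).length = cs.countP (fun c => PySem.Chars.isdigit c) := by
  induction cs generalizing s with
  | nil => simp [idxsR]
  | cons c t ih =>
      by_cases h : PySem.Chars.isdigit c = true <;>
        simp [idxsR, h, List.countP_cons, ih]

-- A's diff-comprehension as a zip over adjacent pairs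
theorem diffs_eq_zip (l : List Int) :
    (PySem.List.pyRange 0 ((l.length : Int) - 1) 1).map
        (fun i => PySem.List.pyGetD l (i + 1) 0 - PySem.List.pyGetD l i 0)
      = (l.zip l.tail).map (fun p => p.2 - p.1) := by
  apply List.ext_getElem
  · simp [PySem.List.length_pyRange_one, List.length_zip]
  · intro i h1 h2
    have hlen : i + 1 < l.length := by
      simp [PySem.List.length_pyRange_one] at h1; omega
    simp only [List.getElem_map, PySem.List.getElem_pyRange_one, List.getElem_zip,
      List.getElem_tail]
    have e1 : (0 : Int) + (i : Int) + 1 = ((i + 1 : Nat) : Int) := by omega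
    have e0 : (0 : Int) + (i : Int) = ((i : Nat) : Int) := by omega
    rw [e1, e0, PySem.List.pyGetD_natCast, PySem.List.pyGetD_natCast,
      List.getD_eq_getElem l 0 hlen, List.getD_eq_getElem l 0 (by omega)]

theorem sum_zip_eq_gaps (a : Int) (t : List Int) :
    (((((a :: t).zip t).map (fun p => p.2 - p.1)).map (fun i => if 1 < i then (1 : Int) else 0)).sum)
      = gapsG a t := by
  induction t generalizing a with
  | nil => simp [gapsG]
  | cons b t ih =>
      have hz : ((a :: b :: t).zip (b :: t)) = (a, b) :: ((b :: t).zip t) := rfl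
      rw [hz]
      simp only [List.map_cons, List.sum_cons, gapsG]
      rw [ih b]

-- A's value as a function of the digit-position list
theorem portA_eq (line_data : String) :
    get_num_digit_seqs line_data =
      (if (idxsR line_data.toList 0).length ≤ 1 then 0
       else countRuns (idxsR line_data.toList 0)) := by
  unfold get_num_digit_seqs
  dsimp only
  rw [idxsR_spec]
  set l := idxsR line_data.toList 0 with hl
  rw [diffs_eq_zip]
  rcases l with _ | ⟨a, t⟩
  · simp
  · rcases t with _ | ⟨b, t⟩
    · simp
    · simp only [List.tail_cons]
      have hne : (((a :: b :: t).zip (b :: t)).map (fun p => p.2 - p.1)) ≠ [] := by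
        simp [List.zip]
      rw [if_neg hne, if_neg (by simp), sum_zip_eq_gaps]
      simp [countRuns]

theorem portB_eq (line_data : String) :
    get_num_digit_seqs_alt line_data = countRuns (idxsR line_data.toList 0) := by
  unfold get_num_digit_seqs_alt
  rw [foldl_eq_rises, (rises_eq line_data.toList 0).2]
  ring

-- ===== VERDICT =====
theorem get_num_digit_seqs_spec : Claim_unchanged_get_num_digit_seqs := by
  intro line_data _ hD
  unfold D_get_num_digit_seqs at hD
  rw [portA_eq, portB_eq]
  have hlen : (idxsR line_data.toList 0).length =
      line_data.toList.countP (fun c => PySem.Chars.isdigit c) := length_idxsR _ _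
  by_cases h : (idxsR line_data.toList 0).length ≤ 1
  · have h0 : (idxsR line_data.toList 0).length = 0 := by omega
    rw [if_pos h, List.length_eq_zero_iff.mp h0]
    simp [countRuns]
  · rw [if_neg h]

theorem get_num_digit_seqs_changed : Claim_changed_get_num_digit_seqs := by
  unfold Claim_changed_get_num_digit_seqs; decide

theorem get_num_digit_seqs_tight : Claim_exact_get_num_digit_seqs := by
  intro line_data _ hD
  unfold D_get_num_digit_seqs at hD
  rw [portA_eq, portB_eq]
  have hlen : (idxsR line_data.toList 0).length = 1 := by rw [length_idxsR]; exact hD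
  rcases List.length_eq_one_iff.mp hlen with ⟨a, ha⟩
  rw [ha]
  simp [countRuns, gapsG]
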